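-- pv_equiv track=rewrite | github.com/panzarkatten/AdventofCode2021 | day5/day5-2.py | get_line_intersects
-- ===== SOURCE A (Python) =====
-- def get_line_intersects(lines):
--     intersects = {}
--     for line in lines:
--         for cord in line:
--             x,y = cord
--             if (x,y) not in intersects:
--                 intersects[(x,y)] = 0
--
--             intersects[(x,y)] += 1
--
--     return [k for k,v in intersects.items() if v > 1]
-- ===== SOURCE B (Python) =====
-- def get_line_intersects(lines):
--     coords = [cord for line in lines for cord in line]
--     s = sorted(coords)
--     dups = {a for a, b in zip(s, s[1:]) if a == b}
--     return [c for c in dict.fromkeys(coords) if c in dups]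
-- ===== Notes on version B (the rewrite author's own statement) =====
-- stated objective: alternative
-- what changed: Duplicates are found by sorting the flattened coordinates and scanning adjacent pairs (zip(s, s[1:])) instead of counting with a dictionary, and the output order comes from a dict.fromkeys dedup of the coordinate stream instead of a counter's insertion order.
import Mathlib
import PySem

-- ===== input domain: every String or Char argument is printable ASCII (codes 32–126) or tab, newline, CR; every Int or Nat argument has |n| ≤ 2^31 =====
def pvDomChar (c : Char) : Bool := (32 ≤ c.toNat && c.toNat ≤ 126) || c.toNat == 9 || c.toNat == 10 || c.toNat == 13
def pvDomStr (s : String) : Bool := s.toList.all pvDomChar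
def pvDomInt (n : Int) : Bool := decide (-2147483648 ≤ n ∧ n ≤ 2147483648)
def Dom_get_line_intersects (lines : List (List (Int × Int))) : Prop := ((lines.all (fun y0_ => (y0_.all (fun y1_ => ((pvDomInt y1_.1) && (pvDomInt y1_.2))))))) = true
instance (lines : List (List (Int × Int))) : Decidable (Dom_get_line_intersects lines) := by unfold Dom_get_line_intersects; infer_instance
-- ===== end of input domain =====

-- B finds the repeated coordinates by sort-and-adjacent-scan plus an ordered dedup instead of A's count dictionary; alternative algorithm, same result.

-- ===== PORT A =====
def get_line_intersects (lines : List (List (Int × Int))) : List (Int × Int) :=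
  let intersects : PySem.Dict (Int × Int) Int :=
    lines.foldl (fun d line =>
      line.foldl (fun d cord =>
        let x := cord.1
        let y := cord.2
        let d := if d.contains (x, y) then d else d.insert (x, y) 0
        d.insert (x, y) (d.getD (x, y) 0 + 1)) d) PySem.Dict.empty
  (intersects.items.filter (fun kv => kv.2 > 1)).map (fun kv => kv.1)

-- ===== PORT B =====
def get_line_intersects_alt (lines : List (List (Int × Int))) : List (Int × Int) :=
  let coords := lines.flatten
  let s := PySem.List.sorted2 coords Prod.fst Prod.snd
  let dups : PySem.Set (Int × Int) :=
    PySem.Set.ofList (((s.zip (PySem.List.slice s (some 1) none)).filter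
      (fun p => p.1 == p.2)).map Prod.fst)
  (PySem.List.dedup coords).filter (fun c => PySem.Set.contains dups c)

-- ===== PRECONDITION & SPEC =====
def Spec_get_line_intersects (lines : List (List (Int × Int))) (out : List (Int × Int)) : Prop := out = get_line_intersects_alt lines
instance (lines : List (List (Int × Int))) (out : List (Int × Int)) : Decidable (Spec_get_line_intersects lines out) := by unfold Spec_get_line_intersects; infer_instance

-- ===== CLAIM (what is proved, stated in full; the proofs are below) =====
def Claim_equal_get_line_intersects : Prop := ∀ (lines : List (List (Int × Int))), Dom_get_line_intersects lines → Spec_get_line_intersects lines (get_line_intersects lines)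

-- ===== LEMMAS AND PROOFS =====

-- A's loop body is exactly the Counter update step.
theorem stepA_eq_modify (d : PySem.Dict (Int × Int) Int) (c : Int × Int) :
    (let d1 := if d.contains c then d else d.insert c 0
     d1.insert c (d1.getD c 0 + 1)) = d.modify c 0 (· + 1) := by
  by_cases h : d.contains c
  · simp [h, PySem.Dict.modify]
  · simp only [h, Bool.false_eq_true, if_false]
    rw [PySem.Dict.getD_insert_self, PySem.Dict.insert_insert_self, PySem.Dict.modify,
        PySem.Dict.getD_of_not_contains _ _ (by simpa using h)]

-- A computes: first occurrences, filtered by total multiplicity > 1.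
theorem A_eq_filter (lines : List (List (Int × Int))) :
    get_line_intersects lines =
      (PySem.Set.ofList lines.flatten).filter
        (fun k => decide ((1 : Int) < (lines.flatten.count k : Int))) := by
  unfold get_line_intersects
  rw [← List.foldl_flatten]
  have hfun : (fun (d : PySem.Dict (Int × Int) Int) (cord : Int × Int) =>
      let x := cord.1
      let y := cord.2
      let d := if d.contains (x, y) then d else d.insert (x, y) 0
      d.insert (x, y) (d.getD (x, y) 0 + 1)) =
      (fun (d : PySem.Dict (Int × Int) Int) (x : Int × Int) => d.modify x 0 (· + 1)) := by
    funext d c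
    simpa using stepA_eq_modify d c
  rw [hfun, ← PySem.Dict.counter_eq_foldl]
  simp only [PySem.Dict.items_counter, List.filter_map, List.map_map, Function.comp_def]
  simp

-- elements of the adjacent-duplicate scan are elements of the list
theorem mem_of_mem_zipdups (l : List (Int × Int)) (v : Int × Int)
    (h : v ∈ ((l.zip l.tail).filter (fun p => p.1 == p.2)).map Prod.fst) : v ∈ l := by
  rcases List.mem_map.mp h with ⟨p, hp, hfst⟩
  have := List.of_mem_filter hp
  have hz := List.mem_filter.mp hp |>.1
  exact hfst ▸ (List.of_mem_zip hz).1

-- in a lexicographically sorted list, a value has an equal adjacent neighbour iff it occurs at least twice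
theorem zipdups_iff_two_le_count (l : List (Int × Int))
    (hs : l.Pairwise (fun a b => (toLex a : Lex (Int × Int)) ≤ toLex b)) (v : Int × Int) :
    (v ∈ ((l.zip l.tail).filter (fun p => p.1 == p.2)).map Prod.fst) ↔ 2 ≤ l.count v := by
  induction l with
  | nil => simp
  | cons a t ih =>
    cases t with
    | nil =>
      simp only [List.tail_cons, List.zip_nil_right, List.filter_nil, List.map_nil,
        List.not_mem_nil, false_iff, List.count_cons, List.count_nil, not_le]
      split <;> omega
    | cons b t' =>
      rw [List.pairwise_cons] at hs
      obtain ⟨ha, ht⟩ := hs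
      have ih' := ih ht
      by_cases hab : a = b
      · subst hab
        rw [show (a :: a :: t').tail = a :: t' from rfl, List.zip_cons_cons,
            List.filter_cons_of_pos (by simp), List.map_cons, List.mem_cons]
        by_cases hv : v = a
        · subst hv
          constructor
          · intro _
            simp
          · intro _
            exact Or.inl rfl
        · rw [or_iff_right hv]
          have hcount : (a :: a :: t').count v = (a :: t').count v := by
            simp [Ne.symm hv]
          rw [hcount]
          exact ih'
      · -- a ≠ b; since the list is sorted, a does not occur again
        have hanotin : a ∉ b :: t' := by
          intro hmem
          rcases List.mem_cons.mp hmem with h1 | h2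
          · exact hab h1
          · have hle1 : (toLex a : Lex (Int × Int)) ≤ toLex b := ha b (by simp)
            have hle2 : (toLex b : Lex (Int × Int)) ≤ toLex a := by
              rw [List.pairwise_cons] at ht
              exact ht.1 a h2
            exact hab (by simpa using le_antisymm hle1 hle2)
        rw [show (a :: b :: t').tail = b :: t' from rfl, List.zip_cons_cons,
            List.filter_cons_of_neg (by simpa using hab)]
        by_cases hv : v = a
        · subst hv
          have h0 : (b :: t').count v = 0 := List.count_eq_zero.mpr hanotin
          constructor
          · intro h
            exact absurd (mem_of_mem_zipdups (b :: t') v h) hanotin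
          · intro h
            rw [List.count_cons, h0] at h
            simp at h
        · have hcount : (a :: b :: t').count v = (b :: t').count v := by
            rw [List.count_cons]
            simp [Ne.symm hv]
          rw [hcount]
          exact ih'

-- B's sorted2 call is sorting by the lexicographic key
theorem sorted2_eq_sorted_lex (xs : List (Int × Int)) :
    PySem.List.sorted2 xs Prod.fst Prod.snd false =
      PySem.List.sorted xs (fun c => (toLex c : Lex (Int × Int))) false := by
  have hbe : (fun (a b : Int × Int) =>
      decide (a.1 < b.1) || (!decide (b.1 < a.1) && decide (a.2 < b.2))) =
      (fun (a b : Int × Int) => decide ((toLex a : Lex (Int × Int)) < toLex b)) := by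
    funext p q
    rcases lt_trichotomy p.1 q.1 with h | h | h
    · simp [Prod.Lex.toLex_lt_toLex, h]
    · simp [Prod.Lex.toLex_lt_toLex, h]
    · simp [Prod.Lex.toLex_lt_toLex, h, not_lt_of_gt h, ne_of_gt h]
  rw [PySem.List.sorted_eq_foldl_insertBy]
  unfold PySem.List.sorted2
  simp only [if_neg (by simp : ¬ false = true), hbe]

theorem B_eq_filter (lines : List (List (Int × Int))) :
    get_line_intersects_alt lines =
      (PySem.Set.ofList lines.flatten).filter
        (fun k => decide ((1 : Int) < (lines.flatten.count k : Int))) := by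
  unfold get_line_intersects_alt
  simp only [PySem.List.slice_from_one, PySem.List.dedup_eq_ofList]
  have hperm : (PySem.List.sorted2 lines.flatten Prod.fst Prod.snd).Perm lines.flatten :=
    PySem.List.sorted2_perm lines.flatten Prod.fst Prod.snd false
  have hpw : (PySem.List.sorted2 lines.flatten Prod.fst Prod.snd).Pairwise
      (fun a b => (toLex a : Lex (Int × Int)) ≤ toLex b) := by
    rw [sorted2_eq_sorted_lex]
    exact PySem.List.sorted_pairwise lines.flatten (fun c => (toLex c : Lex (Int × Int)))
  apply List.filter_congr
  intro v hv
  rw [Bool.eq_iff_iff, PySem.Set.contains_iff, PySem.Set.mem_ofList,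
      zipdups_iff_two_le_count _ hpw v, hperm.count_eq, decide_eq_true_iff]
  omega

-- ===== VERDICT (by name: the statement is the Claim_ definition above) =====
theorem get_line_intersects_spec : Claim_equal_get_line_intersects := by
  intro lines _
  unfold Spec_get_line_intersects
  rw [A_eq_filter, B_eq_filter]
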